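-- pv_equiv track=rewrite | github.com/Cyborgninja21/pychivalry | pychivalry/navigation.py | get_symbol_at_position
-- ===== SOURCE A (Python) =====
-- from typing import Dict, List, Optional, Tuple
--
-- def get_symbol_at_position(
--     document_text: str, line: int, character: int
-- ) -> Optional[Tuple[str, str]]:
--     """
--     Get the symbol at a specific position in the document.
--
--     Args:
--         document_text: The full document text
--         line: Line number (0-indexed)
--         character: Character position (0-indexed)
--
--     Returns:
--         Tuple of (symbol_name, symbol_type) if found, None otherwise
--     """
--     lines = document_text.split("\n")
--     if line >= len(lines):
--         return None
--
--     current_line = lines[line]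
--     if character >= len(current_line):
--         return None
--
--     # Simple heuristic: extract word at position
--     # In real implementation, would use proper AST analysis
--     import re
--
--     # Find word boundaries
--     start = character
--     while start > 0 and (
--         current_line[start - 1].isalnum() or current_line[start - 1] in ("_", ".", ":")
--     ):
--         start -= 1
--
--     end = character
--     while end < len(current_line) and (
--         current_line[end].isalnum() or current_line[end] in ("_", ".", ":")
--     ):
--         end += 1
--
--     symbol = current_line[start:end]
--     if not symbol:
--         return None
--
--     # Determine symbol type based on context
--     # This is simplified - real implementation would use AST
--     if symbol.startswith("scope:"):
--         return (symbol[6:], "saved_scope")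
--     elif "." in symbol and symbol.count(".") >= 2:
--         # Might be an event ID (namespace.number)
--         return (symbol, "event")
--     else:
--         # Could be scripted effect, trigger, or script value
--         # Would need context from AST to determine
--         return (symbol, "unknown")
-- ===== SOURCE B (Python) =====
-- from typing import Optional, Tuple
--
--
-- def _word_char(c: str) -> bool:
--     return c.isalnum() or c in "_.:"
--
--
-- def _classify(symbol: str) -> Tuple[str, str]:
--     if symbol.startswith("scope:"):
--         return (symbol[6:], "saved_scope")
--     elif "." in symbol and symbol.count(".") >= 2:
--         return (symbol, "event")
--     else:
--         return (symbol, "unknown")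
--
--
-- def get_symbol_at_position(
--     document_text: str, line: int, character: int
-- ) -> Optional[Tuple[str, str]]:
--     lines = document_text.split("\n")
--     if line >= len(lines):
--         return None
--
--     current_line = lines[line]
--     if character >= len(current_line):
--         return None
--
--     # One left-to-right pass over the line: collect the maximal runs of
--     # word characters as (start, end) spans.
--     n = len(current_line)
--     spans = []
--     i = 0
--     while i < n:
--         if _word_char(current_line[i]):
--             j = i
--             while j < n and _word_char(current_line[j]):
--                 j += 1
--             spans.append((i, j))
--             i = j
--         else:
--             i += 1
--
--     # Pick the span containing the position (end inclusive: at a run's right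
--     # boundary the word to the left is taken).
--     hit = next((sp for sp in spans if sp[0] <= character <= sp[1]), None)
--     if hit is None:
--         return None
--     return _classify(current_line[hit[0]:hit[1]])
-- ===== Notes on version B (the rewrite author's own statement) =====
-- stated objective: alternative
-- what changed: Instead of A's two bidirectional character scans outward from the cursor, B tokenizes the line in one left-to-right pass into maximal word-character runs (start,end spans) and selects the unique span whose closed interval contains the position, then classifies that substring.
-- outside the precondition, e.g. on get_symbol_at_position('abc', 0, -1): A returns ('c', 'unknown'), B returns None; on get_symbol_at_position('ab c!d', 0, -3): A returns ('c', 'unknown'), B returns None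
import Mathlib
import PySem

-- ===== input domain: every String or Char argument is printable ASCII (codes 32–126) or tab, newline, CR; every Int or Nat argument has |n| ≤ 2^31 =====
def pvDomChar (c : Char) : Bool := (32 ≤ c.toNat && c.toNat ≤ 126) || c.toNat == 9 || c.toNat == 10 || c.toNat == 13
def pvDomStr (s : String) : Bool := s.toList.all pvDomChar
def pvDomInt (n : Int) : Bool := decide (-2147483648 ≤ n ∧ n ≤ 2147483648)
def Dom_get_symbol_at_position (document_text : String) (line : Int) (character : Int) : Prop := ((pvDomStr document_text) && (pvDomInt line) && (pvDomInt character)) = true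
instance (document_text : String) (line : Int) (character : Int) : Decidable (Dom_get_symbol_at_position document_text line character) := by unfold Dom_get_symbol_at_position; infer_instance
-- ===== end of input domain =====

-- B replaces A's two bidirectional scans outward from the cursor by one left-to-right
-- tokenization of the line into maximal word-char runs, then selects the span whose
-- closed interval contains the position (objective: alternative decomposition).

-- ===== PORT A =====

-- c.isalnum() or c in ("_", ".", ":")  (this predicate appears verbatim in both Pythons)
def pvWordChar (c : Char) : Bool := PySem.Chars.isalnum c || c == '_' || c == '.' || c == ':'

-- the loop 'while j < len(line) and wordchar(line[j]): j += 1' (A's `end` loop; also B's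
-- inner run loop — the two Pythons contain this identical loop); fuel only bounds the
-- iteration count, the loop guard is the explicit 'j < cl.length' test
def pvScanRightGo (cl : List Char) : Nat → Nat → Nat
  | 0, j => j
  | fuel+1, j =>
    if j < cl.length then
      (if pvWordChar (cl.getD j ' ') then pvScanRightGo cl fuel (j+1) else j)
    else j

def pvScanRight (cl : List Char) (j : Nat) : Nat := pvScanRightGo cl (cl.length - j) j

-- A's `start` loop: while start > 0 and wordchar(line[start-1]): start -= 1
def pvScanStartA (cl : List Char) : Nat → Nat
  | 0 => 0
  | s+1 => if pvWordChar (cl.getD s ' ') then pvScanStartA cl s else s+1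

def get_symbol_at_position (document_text : String) (line : Int) (character : Int) : Option (String × String) :=
  let lines := PySem.Chars.splitOn document_text.toList ['\n']
  if (lines.length : Int) ≤ line then none
  else
    match PySem.List.pyGet? lines line with
    | none => none  -- Python raises IndexError here (line < -len(lines)); excluded by Pre_
    | some current_line =>
      if (current_line.length : Int) ≤ character then none
      else
        -- Pre_ restricts to 0 ≤ character here, so the scans run on Nat positions
        let c := character.toNat
        let start := pvScanStartA current_line c
        let e := pvScanRight current_line c
        let symbol := PySem.Chars.slice current_line (some (start : Int)) (some (e : Int))
        if symbol = [] then none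
        else if PySem.Chars.startswith symbol ['s','c','o','p','e',':'] then
          some (String.ofList (PySem.Chars.slice symbol (some 6) none), "saved_scope")
        else if PySem.Chars.isIn ['.'] symbol && decide (2 ≤ PySem.Chars.count symbol ['.']) then
          some (String.ofList symbol, "event")
        else
          some (String.ofList symbol, "unknown")

-- ===== PORT B =====

-- B's _classify helper
def pvClassifyB (symbol : List Char) : Option (String × String) :=
  if PySem.Chars.startswith symbol ['s','c','o','p','e',':'] then
    some (String.ofList (PySem.Chars.slice symbol (some 6) none), "saved_scope")
  else if PySem.Chars.isIn ['.'] symbol && decide (2 ≤ PySem.Chars.count symbol ['.']) then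
    some (String.ofList symbol, "event")
  else
    some (String.ofList symbol, "unknown")

-- B's single left-to-right pass collecting maximal word-char runs as (start, end) spans;
-- the inner 'j' loop starts at i with wordchar(line[i]) true, so it equals pvScanRight cl (i+1)
def pvSpansGo (cl : List Char) : Nat → Nat → List (Nat × Nat)
  | 0, _ => []
  | fuel+1, i =>
    if i < cl.length then
      if pvWordChar (cl.getD i ' ') then
        (i, pvScanRight cl (i+1)) :: pvSpansGo cl fuel (pvScanRight cl (i+1))
      else pvSpansGo cl fuel (i+1)
    else []

def pvSpans (cl : List Char) (i : Nat) : List (Nat × Nat) := pvSpansGo cl (cl.length - i) i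

def get_symbol_at_position_alt (document_text : String) (line : Int) (character : Int) : Option (String × String) :=
  let lines := PySem.Chars.splitOn document_text.toList ['\n']
  if (lines.length : Int) ≤ line then none
  else
    match PySem.List.pyGet? lines line with
    | none => none  -- excluded by Pre_
    | some current_line =>
      if (current_line.length : Int) ≤ character then none
      else
        match (pvSpans current_line 0).find?
            (fun sp => decide ((sp.1 : Int) ≤ character ∧ character ≤ (sp.2 : Int))) with
        | none => none
        | some sp =>
          pvClassifyB (PySem.Chars.slice current_line (some (sp.1 : Int)) (some (sp.2 : Int)))

-- ===== PRECONDITION & SPEC =====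
-- Pre_ excludes (a) line < -len(lines), where both Pythons raise IndexError on the line
-- lookup, and (b) negative character positions on an in-range line, outside the function's
-- natural 0-indexed domain: there A's boundary scan mixes Python negative (wrap-around) and
-- nonnegative indexing, raising IndexError for character < -len(current_line) and otherwise
-- slicing accidental wrap-around values.
def Pre_get_symbol_at_position (document_text : String) (line : Int) (character : Int) : Prop :=
  -(((PySem.Chars.splitOn document_text.toList ['\n']).length : Int)) ≤ line ∧
  (0 ≤ character ∨ ((PySem.Chars.splitOn document_text.toList ['\n']).length : Int) ≤ line)
instance (document_text : String) (line : Int) (character : Int) : Decidable (Pre_get_symbol_at_position document_text line character) := by unfold Pre_get_symbol_at_position; infer_instance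

def pvWitness_get_symbol_at_position : String × Int × Int := ("scope:foo x.y.z", 0, 2)

def Spec_get_symbol_at_position (document_text : String) (line : Int) (character : Int) (out : Option (String × String)) : Prop := out = get_symbol_at_position_alt document_text line character
instance (document_text : String) (line : Int) (character : Int) (out : Option (String × String)) : Decidable (Spec_get_symbol_at_position document_text line character out) := by unfold Spec_get_symbol_at_position; infer_instance

-- ===== CLAIM (what is proved, stated in full; the proofs are below) =====
def Claim_equal_get_symbol_at_position : Prop := ∀ (document_text : String) (line : Int) (character : Int), Dom_get_symbol_at_position document_text line character → Pre_get_symbol_at_position document_text line character → Spec_get_symbol_at_position document_text line character (get_symbol_at_position document_text line character)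

-- ===== LEMMAS AND PROOFS =====

-- one-step unfolding of the while loop
theorem pvScanRight_eq (cl : List Char) (j : Nat) :
    pvScanRight cl j =
      if j < cl.length then
        (if pvWordChar (cl.getD j ' ') then pvScanRight cl (j+1) else j)
      else j := by
  unfold pvScanRight
  by_cases hj : j < cl.length
  · rw [if_pos hj, show cl.length - j = (cl.length - (j+1)) + 1 from by omega]
    simp only [pvScanRightGo, if_pos hj]
  · rw [if_neg hj, show cl.length - j = 0 from by omega]
    rfl

theorem pvScanRightGo_ge (cl : List Char) :
    ∀ (fuel j : Nat), j ≤ pvScanRightGo cl fuel j := by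
  intro fuel
  induction fuel with
  | zero => intro j; exact le_refl j
  | succ f ih =>
    intro j
    simp only [pvScanRightGo]
    split
    · split
      · exact le_trans (by omega) (ih (j+1))
      · exact le_refl j
    · exact le_refl j

theorem pvScanRight_ge (cl : List Char) (j : Nat) : j ≤ pvScanRight cl j :=
  pvScanRightGo_ge cl _ j

theorem pvScanRightGo_le (cl : List Char) :
    ∀ (fuel j : Nat), j ≤ cl.length → pvScanRightGo cl fuel j ≤ cl.length := by
  intro fuel
  induction fuel with
  | zero => intro j h; exact h
  | succ f ih =>
    intro j h
    simp only [pvScanRightGo]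
    split
    · split
      · exact ih (j+1) (by omega)
      · exact h
    · exact h

theorem pvScanRight_le (cl : List Char) (j : Nat) (h : j ≤ cl.length) :
    pvScanRight cl j ≤ cl.length :=
  pvScanRightGo_le cl _ j h

theorem pvScanRightGo_word (cl : List Char) :
    ∀ (fuel j k : Nat), j ≤ k → k < pvScanRightGo cl fuel j →
    pvWordChar (cl.getD k ' ') = true := by
  intro fuel
  induction fuel with
  | zero => intro j k h1 h2; simp only [pvScanRightGo] at h2; omega
  | succ f ih =>
    intro j k h1 h2
    simp only [pvScanRightGo] at h2
    by_cases hj : j < cl.length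
    · rw [if_pos hj] at h2
      by_cases hw : pvWordChar (cl.getD j ' ') = true
      · rw [if_pos hw] at h2
        rcases Nat.eq_or_lt_of_le h1 with rfl | hlt
        · exact hw
        · exact ih (j+1) k hlt h2
      · rw [if_neg hw] at h2; omega
    · rw [if_neg hj] at h2; omega

theorem pvScanRight_word (cl : List Char) (j k : Nat) (h1 : j ≤ k)
    (h2 : k < pvScanRight cl j) : pvWordChar (cl.getD k ' ') = true :=
  pvScanRightGo_word cl _ j k h1 h2

theorem pvScanRightGo_stop (cl : List Char) :
    ∀ (fuel j : Nat), cl.length - j ≤ fuel → pvScanRightGo cl fuel j < cl.length →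
    pvWordChar (cl.getD (pvScanRightGo cl fuel j) ' ') = false := by
  intro fuel
  induction fuel with
  | zero => intro j h1 h2; simp only [pvScanRightGo] at h2; omega
  | succ f ih =>
    intro j h1 h2
    simp only [pvScanRightGo] at h2 ⊢
    by_cases hj : j < cl.length
    · rw [if_pos hj] at h2 ⊢
      by_cases hw : pvWordChar (cl.getD j ' ') = true
      · rw [if_pos hw] at h2 ⊢
        exact ih (j+1) (by omega) h2
      · rw [if_neg hw] at h2 ⊢
        exact Bool.eq_false_iff.mpr hw
    · rw [if_neg hj] at h2; omega

theorem pvScanRight_stop (cl : List Char) (j : Nat)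
    (h : pvScanRight cl j < cl.length) :
    pvWordChar (cl.getD (pvScanRight cl j) ' ') = false :=
  pvScanRightGo_stop cl _ j (le_refl _) h

theorem pvScanRight_stopAt (cl : List Char) (j : Nat)
    (h : cl.length ≤ j ∨ pvWordChar (cl.getD j ' ') = false) :
    pvScanRight cl j = j := by
  rw [pvScanRight_eq]
  rcases h with h | h
  · rw [if_neg (by omega)]
  · split
    · rw [if_neg (fun hcon => by rw [hcon] at h; simp at h)]
    · rfl

theorem pvScanRight_extend (cl : List Char) (j r : Nat) (h1 : j ≤ r) (h2 : r ≤ cl.length)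
    (h3 : ∀ k, j ≤ k → k < r → pvWordChar (cl.getD k ' ') = true) :
    pvScanRight cl j = pvScanRight cl r := by
  induction hn : r - j generalizing j with
  | zero => have : j = r := by omega
            rw [this]
  | succ n ih =>
    have hjr : j < r := by omega
    have hjl : j < cl.length := by omega
    rw [pvScanRight_eq, if_pos hjl, if_pos (h3 j (le_refl j) hjr)]
    exact ih (j+1) (by omega) (fun k hk1 hk2 => h3 k (by omega) hk2) (by omega)

theorem pvScanStartA_le (cl : List Char) (c : Nat) : pvScanStartA cl c ≤ c := by
  induction c with
  | zero => simp [pvScanStartA]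
  | succ c ih =>
    rw [pvScanStartA]
    split
    · omega
    · omega

theorem pvScanStartA_eq (cl : List Char) :
    ∀ (c i : Nat), i ≤ c →
    (∀ k, i ≤ k → k < c → pvWordChar (cl.getD k ' ') = true) →
    (i = 0 ∨ pvWordChar (cl.getD (i-1) ' ') = false) →
    pvScanStartA cl c = i := by
  intro c
  induction c with
  | zero => intro i h1 _ _; rw [Nat.le_zero.mp h1]; rfl
  | succ c ih =>
    intro i h1 h2 h3
    rcases Nat.eq_or_lt_of_le h1 with rfl | hlt
    · have h3' : pvWordChar (cl.getD ((c+1)-1) ' ') = false := by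
        rcases h3 with h3 | h3
        · omega
        · exact h3
      simp only [Nat.add_sub_cancel] at h3'
      rw [pvScanStartA, if_neg (fun hcon => by rw [hcon] at h3'; simp at h3')]
    · rw [pvScanStartA, if_pos (h2 c (by omega) (by omega))]
      exact ih i (by omega) (fun k hk1 hk2 => h2 k hk1 (by omega)) h3

theorem pvSpansGo_ge (cl : List Char) :
    ∀ (fuel i : Nat), ∀ sp ∈ pvSpansGo cl fuel i, i ≤ sp.1 := by
  intro fuel
  induction fuel with
  | zero => intro i sp hsp; simp [pvSpansGo] at hsp
  | succ f ih =>
    intro i sp hsp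
    simp only [pvSpansGo] at hsp
    by_cases hi : i < cl.length
    · rw [if_pos hi] at hsp
      by_cases hw : pvWordChar (cl.getD i ' ') = true
      · rw [if_pos hw] at hsp
        rcases List.mem_cons.mp hsp with rfl | hsp
        · exact le_refl _
        · have := ih (pvScanRight cl (i+1)) sp hsp
          have := pvScanRight_ge cl (i+1)
          omega
      · rw [if_neg hw] at hsp
        have := ih (i+1) sp hsp
        omega
    · rw [if_neg hi] at hsp
      simp at hsp

-- the invariant carried down B's span list while searching for position c
def pvInv (cl : List Char) (i c : Nat) : Prop :=
  (i = 0 ∨ pvWordChar (cl.getD (i-1) ' ') = false) ∨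
  (i < c ∧ pvWordChar (cl.getD i ' ') = false)

theorem pvMainGo (cl : List Char) (c : Nat) :
    ∀ (fuel : Nat), ∀ (i : Nat), cl.length - i ≤ fuel → i ≤ c → c < cl.length → pvInv cl i c →
    (pvSpansGo cl fuel i).find? (fun sp => decide ((sp.1 : Int) ≤ (c : Int) ∧ (c : Int) ≤ (sp.2 : Int)))
      = (if pvScanStartA cl c = pvScanRight cl c then none
         else some (pvScanStartA cl c, pvScanRight cl c)) := by
  intro fuel
  induction fuel with
  | zero => intro i hf h1 h2 h3; omega
  | succ f ih =>
    intro i hf h1 h2 h3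
    have hi : i < cl.length := by omega
    simp only [pvSpansGo, if_pos hi]
    by_cases hw : pvWordChar (cl.getD i ' ') = true
    · rw [if_pos hw]
      have hEq : pvScanRight cl i = pvScanRight cl (i+1) := by
        rw [pvScanRight_eq, if_pos hi, if_pos hw]
      have hir : i < pvScanRight cl (i+1) := by
        have := pvScanRight_ge cl (i+1); omega
      have hjlen : pvScanRight cl (i+1) ≤ cl.length := pvScanRight_le cl (i+1) (by omega)
      have hword : ∀ k, i ≤ k → k < pvScanRight cl (i+1) → pvWordChar (cl.getD k ' ') = true := by
        intro k hk1 hk2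
        exact pvScanRight_word cl i k hk1 (by omega)
      have hInv1 : i = 0 ∨ pvWordChar (cl.getD (i-1) ' ') = false := by
        rcases h3 with h3 | h3
        · exact h3
        · exact absurd hw (fun hcon => by rw [hcon] at h3; simp at h3)
      by_cases hcr : c ≤ pvScanRight cl (i+1)
      · rw [List.find?_cons_of_pos (by simp; omega)]
        have hstart : pvScanStartA cl c = i :=
          pvScanStartA_eq cl c i h1 (fun k hk1 hk2 => hword k hk1 (by omega)) hInv1
        have hend : pvScanRight cl c = pvScanRight cl (i+1) := by
          rw [pvScanRight_extend cl c (pvScanRight cl (i+1)) hcr hjlen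
            (fun k hk1 hk2 => hword k (by omega) hk2)]
          apply pvScanRight_stopAt
          rcases Nat.lt_or_ge (pvScanRight cl (i+1)) cl.length with hlt | hge
          · right
            have := pvScanRight_stop cl i (by omega)
            rwa [hEq] at this
          · left; omega
        rw [hstart, hend, if_neg (by omega)]
      · rw [List.find?_cons_of_neg (by simp; omega)]
        apply ih (pvScanRight cl (i+1)) (by omega) (by omega) h2
        right
        constructor
        · omega
        · have := pvScanRight_stop cl i (by omega)
          rwa [hEq] at this
    · rw [if_neg hw]
      have hwf : pvWordChar (cl.getD i ' ') = false := Bool.eq_false_iff.mpr hw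
      rcases Nat.eq_or_lt_of_le h1 with rfl | hlt
      · have hstart : pvScanStartA cl i = i := by
          apply pvScanStartA_eq cl i i (le_refl i) (by intro k hk1 hk2; omega)
          rcases h3 with h3 | h3
          · exact h3
          · omega
        have hend : pvScanRight cl i = i := pvScanRight_stopAt cl i (Or.inr hwf)
        rw [hstart, hend, if_pos rfl]
        apply List.find?_eq_none.mpr
        intro sp hsp
        have := pvSpansGo_ge cl f (i+1) sp hsp
        simp
        omega
      · exact ih (i+1) (by omega) (by omega) h2 (Or.inl (Or.inr hwf))

theorem pvMain (cl : List Char) (c : Nat) (i : Nat) (h1 : i ≤ c) (h2 : c < cl.length)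
    (h3 : pvInv cl i c) :
    (pvSpans cl i).find? (fun sp => decide ((sp.1 : Int) ≤ (c : Int) ∧ (c : Int) ≤ (sp.2 : Int)))
      = (if pvScanStartA cl c = pvScanRight cl c then none
         else some (pvScanStartA cl c, pvScanRight cl c)) :=
  pvMainGo cl c _ i (le_refl _) h1 h2 h3

theorem pvSliceEmpty (cl : List Char) (s e : Nat) (hs : s < cl.length) :
    PySem.Chars.slice cl (some (s : Int)) (some (e : Int)) = [] ↔ e ≤ s := by
  rw [PySem.Chars.slice_eq_listSlice, PySem.List.slice_natCast]
  constructor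
  · intro h
    have := congrArg List.length h
    simp at this
    omega
  · intro h
    have : e - s = 0 := by omega
    simp [this]

-- ===== VERDICT (by name: the statement is the Claim_ definition above) =====
theorem get_symbol_at_position_spec : Claim_equal_get_symbol_at_position := by
  intro dt line ch _ hpre
  obtain ⟨hlo, hdisj⟩ := hpre
  unfold Spec_get_symbol_at_position
  simp only [get_symbol_at_position, get_symbol_at_position_alt]
  by_cases hL : ((PySem.Chars.splitOn dt.toList ['\n']).length : Int) ≤ line
  · rw [if_pos hL, if_pos hL]
  · rw [if_neg hL, if_neg hL]
    cases hget : PySem.List.pyGet? (PySem.Chars.splitOn dt.toList ['\n']) line with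
    | none => rfl
    | some cl =>
      dsimp only
      by_cases hC : ((cl.length : Int) ≤ ch)
      · rw [if_pos hC, if_pos hC]
      · rw [if_neg hC, if_neg hC]
        have hch : 0 ≤ ch := hdisj.resolve_right hL
        have hc : ch = ((ch.toNat : Nat) : Int) := (Int.toNat_of_nonneg hch).symm
        rw [hc]
        simp only [Int.toNat_natCast]
        have hclen : ch.toNat < cl.length := by omega
        rw [pvMain cl ch.toNat 0 (Nat.zero_le _) hclen (Or.inl (Or.inl rfl))]
        by_cases heq : pvScanStartA cl ch.toNat = pvScanRight cl ch.toNat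
        · rw [if_pos heq]
          rw [if_pos ((pvSliceEmpty cl _ _ (by
                have := pvScanStartA_le cl ch.toNat; omega)).mpr (by omega))]
        · rw [if_neg heq]
          have hsc := pvScanStartA_le cl ch.toNat
          have hce := pvScanRight_ge cl ch.toNat
          rw [if_neg (fun hnil => by
            have := (pvSliceEmpty cl _ _ (by omega)).mp hnil
            omega)]
          rfl
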